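-- pv_equiv track=rewrite | github.com/Jingkzhou/python_data_lineage | main_to_csv.py | _split_insert_prefix
-- ===== SOURCE A (Python) =====
-- def _find_top_level_keyword(text: str, keyword: str, start: int = 0) -> int:
--     keyword_upper = keyword.upper()
--     text_upper = text.upper()
--     in_single = False
--     in_double = False
--     depth = 0
--     i = start
--     while i < len(text):
--         ch = text[i]
--         if ch == "'" and not in_double:
--             if in_single and i + 1 < len(text) and text[i + 1] == "'":
--                 i += 2
--                 continue
--             in_single = not in_single
--             i += 1
--             continue
--         if ch == '"' and not in_single:
--             if in_double and i + 1 < len(text) and text[i + 1] == '"':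
--                 i += 2
--                 continue
--             in_double = not in_double
--             i += 1
--             continue
--         if in_single or in_double:
--             i += 1
--             continue
--         if ch == '(':
--             depth += 1
--             i += 1
--             continue
--         if ch == ')':
--             depth = max(depth - 1, 0)
--             i += 1
--             continue
--         if depth == 0 and text_upper.startswith(keyword_upper, i):
--             before = text_upper[i - 1] if i > 0 else ' '
--             after = text_upper[i + len(keyword)] if i + len(keyword) < len(text) else ' '
--             if not before.isalnum() and before != '_' and not after.isalnum() and after != '_':
--                 return i
--         i += 1
--     return -1
--
-- def _split_insert_prefix(insert_sql: str) -> tuple[str, str]: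
--     stmt = insert_sql.strip()
--     positions = []
--     for keyword in ('VALUES', 'WITH', 'SELECT'):
--         pos = _find_top_level_keyword(stmt, keyword)
--         if pos != -1:
--             positions.append((pos, keyword))
--     if not positions:
--         return stmt, ''
--     pos, _ = min(positions, key=lambda item: item[0])
--     prefix = stmt[:pos].rstrip()
--     rest = stmt[pos:].lstrip()
--     return prefix, rest
-- ===== SOURCE B (Python) =====
-- # B: two staged passes -- a pure top-level mask of the statement, then one search for the
-- # earliest masked index matching any keyword -- instead of three fused keyword scans combined by min.
--
-- _KEYWORDS = ('VALUES', 'WITH', 'SELECT')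
--
--
-- def _top_level_mask(stmt):
--     """mask[i] is True iff index i is scanned at paren depth 0 outside string literals
--     (quote/paren characters themselves and characters skipped by ''/"" escapes are False)."""
--     mask = []
--     in_single = False
--     in_double = False
--     depth = 0
--     i = 0
--     n = len(stmt)
--     while i < n:
--         ch = stmt[i]
--         if ch == "'" and not in_double:
--             if in_single and i + 1 < n and stmt[i + 1] == "'":
--                 mask.append(False)
--                 mask.append(False)
--                 i += 2
--                 continue
--             in_single = not in_single
--             mask.append(False)
--         elif ch == '"' and not in_single:
--             if in_double and i + 1 < n and stmt[i + 1] == '"':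
--                 mask.append(False)
--                 mask.append(False)
--                 i += 2
--                 continue
--             in_double = not in_double
--             mask.append(False)
--         elif in_single or in_double:
--             mask.append(False)
--         elif ch == '(':
--             depth += 1
--             mask.append(False)
--         elif ch == ')':
--             depth = max(depth - 1, 0)
--             mask.append(False)
--         else:
--             mask.append(depth == 0)
--         i += 1
--     return mask
--
--
-- def _is_word(up, n, i, kw):
--     if not up.startswith(kw, i):
--         return False
--     before = up[i - 1] if i > 0 else ' '
--     after = up[i + len(kw)] if i + len(kw) < n else ' '
--     return (not before.isalnum() and before != '_'
--             and not after.isalnum() and after != '_')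
--
--
-- def _split_insert_prefix(insert_sql):
--     stmt = insert_sql.strip()
--     up = stmt.upper()
--     n = len(stmt)
--     pos = None
--     for i, ok in enumerate(_top_level_mask(stmt)):
--         if ok and any(_is_word(up, n, i, kw) for kw in _KEYWORDS):
--             pos = i
--             break
--     if pos is None:
--         return stmt, ''
--     return stmt[:pos].rstrip(), stmt[pos:].lstrip()
-- ===== Notes on version B (the rewrite author's own statement) =====
-- stated objective: alternative
-- what changed: A runs the quote/paren scanner three times (once per keyword) and takes min of the found positions; B computes a top-level-position mask in one pure pass and then searches it once for the earliest index where any of the three keywords matches.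
import Mathlib
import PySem

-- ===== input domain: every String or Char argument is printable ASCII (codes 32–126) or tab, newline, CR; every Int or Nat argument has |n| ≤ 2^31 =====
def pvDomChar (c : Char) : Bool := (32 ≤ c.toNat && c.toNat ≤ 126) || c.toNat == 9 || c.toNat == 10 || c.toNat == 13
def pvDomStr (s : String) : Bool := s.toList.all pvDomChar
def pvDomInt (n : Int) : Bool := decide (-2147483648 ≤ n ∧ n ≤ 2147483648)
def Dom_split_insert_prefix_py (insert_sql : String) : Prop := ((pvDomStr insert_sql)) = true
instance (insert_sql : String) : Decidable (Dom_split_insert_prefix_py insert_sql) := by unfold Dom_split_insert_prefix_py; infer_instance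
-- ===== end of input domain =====

-- B replaces A's three fused keyword scans combined by min with two staged passes:
-- a pure top-level mask of the statement, then one search of the mask (objective: alternative).

-- ===== PORT A =====
-- word-boundary match test of A at index i: text_upper.startswith(keyword_upper, i) plus the
-- before/after isalnum/'_' checks (tu = text_upper, ku = keyword_upper, n = len(text)).
def pvWordOkA (tu ku : List Char) (n i : Nat) : Bool :=
  ku.isPrefixOf (tu.drop i) &&
  (let before := if 0 < i then tu.getD (i - 1) ' ' else ' '   -- i-1 < len when taken: getD exact
   let after := if i + ku.length < n then tu.getD (i + ku.length) ' ' else ' '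
   !(PySem.Chars.isalnum before) && !(before == '_') &&
   !(PySem.Chars.isalnum after) && !(after == '_'))

-- the while-loop of _find_top_level_keyword, branch for branch (Nat depth: `depth - 1` IS max(depth-1,0))
def pvFindLoopA (text tu ku : List Char) (inS inD : Bool) (depth i : Nat) : Int :=
  if h : i < text.length then
    let ch := text[i]
    if ch == '\'' && !inD then
      if inS && decide (i + 1 < text.length) && (text.getD (i + 1) ' ' == '\'') then
        pvFindLoopA text tu ku inS inD depth (i + 2)
      else pvFindLoopA text tu ku (!inS) inD depth (i + 1)
    else if ch == '"' && !inS then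
      if inD && decide (i + 1 < text.length) && (text.getD (i + 1) ' ' == '"') then
        pvFindLoopA text tu ku inS inD depth (i + 2)
      else pvFindLoopA text tu ku inS (!inD) depth (i + 1)
    else if inS || inD then pvFindLoopA text tu ku inS inD depth (i + 1)
    else if ch == '(' then pvFindLoopA text tu ku inS inD (depth + 1) (i + 1)
    else if ch == ')' then pvFindLoopA text tu ku inS inD (depth - 1) (i + 1)
    else if (depth == 0) && pvWordOkA tu ku text.length i then (i : Int)
    else pvFindLoopA text tu ku inS inD depth (i + 1)
  else -1
termination_by text.length - i
decreasing_by all_goals omega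

def pvFindTopLevelKeyword (text keyword : List Char) (start : Nat) : Int :=
  pvFindLoopA text (PySem.Chars.upper text) (PySem.Chars.upper keyword) false false 0 start

def split_insert_prefix_py (insert_sql : String) : String × String :=
  let stmt := PySem.Str.strip insert_sql
  let s := stmt.toList
  let positions : List (Int × String) :=
    ["VALUES", "WITH", "SELECT"].foldl
      (fun acc kw =>
        let pos := pvFindTopLevelKeyword s kw.toList 0
        if pos ≠ -1 then acc ++ [(pos, kw)] else acc) []
  if positions.isEmpty then (stmt, "")
  else
    match PySem.List.min? positions (fun item => item.1) with
    | none => (stmt, "")   -- unreachable: positions is nonempty (Python min raises only on empty)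
    | some (pos, _) =>
      (String.ofList (PySem.Chars.rstrip (PySem.Chars.slice s none (some pos))),
       String.ofList (PySem.Chars.lstrip (PySem.Chars.slice s (some pos) none)))

-- ===== PORT B =====
-- Source B's _top_level_mask: one pure pass over the characters emitting a Bool per index
def pvMask (stmt : List Char) (inS inD : Bool) (depth : Nat) : List Bool :=
  match stmt with
  | [] => []
  | c :: rest =>
    if c == '\'' && !inD then
      if inS && decide (rest ≠ []) && (rest.headD ' ' == '\'') then
        false :: false :: pvMask rest.tail inS inD depth
      else false :: pvMask rest (!inS) inD depth
    else if c == '"' && !inS then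
      if inD && decide (rest ≠ []) && (rest.headD ' ' == '"') then
        false :: false :: pvMask rest.tail inS inD depth
      else false :: pvMask rest inS (!inD) depth
    else if inS || inD then false :: pvMask rest inS inD depth
    else if c == '(' then false :: pvMask rest inS inD (depth + 1)
    else if c == ')' then false :: pvMask rest inS inD (depth - 1)
    else (depth == 0) :: pvMask rest inS inD depth
termination_by stmt.length
decreasing_by all_goals simp [List.length_tail]

-- Source B's _is_word(up, n, i, kw)
def pvWordOkB (up : List Char) (n i : Nat) (kw : List Char) : Bool :=
  kw.isPrefixOf (up.drop i) &&
  (let before := if 0 < i then up.getD (i - 1) ' ' else ' '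
   let after := if i + kw.length < n then up.getD (i + kw.length) ' ' else ' '
   !(PySem.Chars.isalnum before) && !(before == '_') &&
   !(PySem.Chars.isalnum after) && !(after == '_'))

-- Source B's `for i, ok in enumerate(mask): if ok and any(...): pos = i; break`
def pvFirstKw (up : List Char) (n : Nat) : List Bool → Nat → Option Nat
  | [], _ => none
  | ok :: rest, i =>
    if ok && (["VALUES".toList, "WITH".toList, "SELECT".toList].any
        (fun kw => pvWordOkB up n i kw)) then some i
    else pvFirstKw up n rest (i + 1)

def split_insert_prefix_py_alt (insert_sql : String) : String × String :=
  let stmt := PySem.Str.strip insert_sql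
  let s := stmt.toList
  match pvFirstKw (PySem.Chars.upper s) s.length (pvMask s false false 0) 0 with
  | none => (stmt, "")
  | some p =>
    (String.ofList (PySem.Chars.rstrip (PySem.Chars.slice s none (some (p : Int)))),
     String.ofList (PySem.Chars.lstrip (PySem.Chars.slice s (some (p : Int)) none)))

-- ===== PRECONDITION & SPEC =====
def Spec_split_insert_prefix_py (insert_sql : String) (out : String × String) : Prop := out = split_insert_prefix_py_alt insert_sql
instance (insert_sql : String) (out : String × String) : Decidable (Spec_split_insert_prefix_py insert_sql out) := by unfold Spec_split_insert_prefix_py; infer_instance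

-- ===== CLAIM (what is proved, stated in full; the proofs are below) =====
def Claim_equal_split_insert_prefix_py : Prop := ∀ (insert_sql : String), Dom_split_insert_prefix_py insert_sql → Spec_split_insert_prefix_py insert_sql (split_insert_prefix_py insert_sql)

-- ===== LEMMAS AND PROOFS =====

-- proof-only helpers: a single-keyword search over the mask, and min over Option Nat
def pvFirstOne (up kw : List Char) (n : Nat) : List Bool → Nat → Option Nat
  | [], _ => none
  | ok :: rest, i =>
    if ok && pvWordOkB up n i kw then some i else pvFirstOne up kw n rest (i + 1)

def pvOptToInt : Option Nat → Int
  | none => -1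
  | some j => (j : Int)

def pvMinOpt : Option Nat → Option Nat → Option Nat
  | none, y => y
  | some x, none => some x
  | some x, some y => some (min x y)

theorem pvHeadD_drop (l : List Char) (m : Nat) (d : Char) :
    (l.drop m).headD d = l.getD m d := by
  simp [List.headD_eq_head?_getD, List.head?_drop, List.getD_eq_getElem?_getD]

theorem pvFirstOne_lb (up kw : List Char) (n : Nat) (mask : List Bool) :
    ∀ i j, pvFirstOne up kw n mask i = some j → i ≤ j := by
  induction mask with
  | nil => intro i j h; simp [pvFirstOne] at h
  | cons ok rest ih =>
    intro i j h
    rw [pvFirstOne] at h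
    split at h
    · simp_all
    · exact Nat.le_of_succ_le (ih (i + 1) j h)

theorem pvMinOpt_lb (i : Nat) (x y : Option Nat)
    (hx : ∀ j, x = some j → i ≤ j) (hy : ∀ j, y = some j → i ≤ j) :
    ∀ j, pvMinOpt x y = some j → i ≤ j := by
  intro j h
  cases x with
  | none => exact hy j h
  | some a => cases y with
    | none => simp [pvMinOpt] at h; exact h ▸ hx a rfl
    | some b =>
      simp [pvMinOpt] at h
      have := hx a rfl; have := hy b rfl; omega

theorem pvMinOpt_left (i : Nat) (y : Option Nat) (hy : ∀ j, y = some j → i ≤ j) :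
    pvMinOpt (some i) y = some i := by
  cases y with
  | none => rfl
  | some b => simp [pvMinOpt, Nat.min_eq_left (hy b rfl)]

theorem pvMinOpt_right (i : Nat) (x : Option Nat) (hx : ∀ j, x = some j → i ≤ j) :
    pvMinOpt x (some i) = some i := by
  cases x with
  | none => rfl
  | some a => simp [pvMinOpt, Nat.min_eq_right (hx a rfl)]

-- the fused search equals the min of the three single-keyword searches
theorem pvFirstKw_eq (up : List Char) (n : Nat) (mask : List Bool) :
    ∀ i, pvFirstKw up n mask i =
      pvMinOpt (pvFirstOne up "VALUES".toList n mask i)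
        (pvMinOpt (pvFirstOne up "WITH".toList n mask i)
          (pvFirstOne up "SELECT".toList n mask i)) := by
  induction mask with
  | nil => intro i; rfl
  | cons ok rest ih =>
    intro i
    have hv := pvFirstOne_lb up "VALUES".toList n rest (i + 1)
    have hw := pvFirstOne_lb up "WITH".toList n rest (i + 1)
    have hs := pvFirstOne_lb up "SELECT".toList n rest (i + 1)
    have hv' : ∀ j, pvFirstOne up "VALUES".toList n rest (i+1) = some j → i ≤ j :=
      fun j h => Nat.le_of_succ_le (hv j h)
    have hw' : ∀ j, pvFirstOne up "WITH".toList n rest (i+1) = some j → i ≤ j :=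
      fun j h => Nat.le_of_succ_le (hw j h)
    have hs' : ∀ j, pvFirstOne up "SELECT".toList n rest (i+1) = some j → i ≤ j :=
      fun j h => Nat.le_of_succ_le (hs j h)
    rw [pvFirstKw, pvFirstOne, pvFirstOne, pvFirstOne]
    cases ok with
    | false =>
      simp only [Bool.false_and, if_false, Bool.false_eq_true, ite_false]
      exact ih (i + 1)
    | true =>
      simp only [Bool.true_and, List.any_cons, List.any_nil, Bool.or_false]
      cases h1 : pvWordOkB up n i "VALUES".toList <;>
      cases h2 : pvWordOkB up n i "WITH".toList <;>
      cases h3 : pvWordOkB up n i "SELECT".toList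
      all_goals simp only [Bool.false_or, Bool.or_false, Bool.true_or, Bool.or_true,
        Bool.or_self, if_true, if_false, Bool.false_eq_true, Bool.true_eq_false, ite_true,
        ite_false, reduceIte]
      case false.false.false => exact ih (i + 1)
      case false.false.true =>
        rw [pvMinOpt_right i _ hw', pvMinOpt_right i _ hv']
      case false.true.false =>
        rw [pvMinOpt_left i _ hs', pvMinOpt_right i _ hv']
      case false.true.true =>
        rw [show pvMinOpt (some i) (some i) = some i by simp [pvMinOpt]]
        rw [pvMinOpt_right i _ hv']
      case true.false.false =>
        rw [pvMinOpt_left i _ (pvMinOpt_lb i _ _ hw' hs')]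
      case true.false.true =>
        rw [pvMinOpt_right i _ hw']
        rw [show pvMinOpt (some i) (some i) = some i by simp [pvMinOpt]]
      case true.true.false =>
        rw [pvMinOpt_left i _ hs']
        rw [show pvMinOpt (some i) (some i) = some i by simp [pvMinOpt]]
      case true.true.true =>
        simp [pvMinOpt]

theorem pvNeTrue (j : Nat) : ((j : Int) ≠ -1) = True := eq_true (by omega)
theorem pvNeFalse : ((-1 : Int) ≠ -1) = False := eq_false (by omega)

-- A's fused scan equals the single-keyword search over the mask of the remaining suffix
theorem pvFindLoopA_eq (text tu ku : List Char) :
    ∀ N i inS inD depth, text.length - i ≤ N →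
      pvFindLoopA text tu ku inS inD depth i =
        pvOptToInt (pvFirstOne tu ku text.length (pvMask (text.drop i) inS inD depth) i) := by
  intro N
  induction N with
  | zero =>
    intro i inS inD depth hN
    have hge : text.length ≤ i := by omega
    rw [pvFindLoopA, dif_neg (by omega), List.drop_eq_nil_iff.mpr hge, pvMask]
    rfl
  | succ N ih =>
    intro i inS inD depth hN
    by_cases hi : i < text.length
    · have hdrop : text.drop i = text[i] :: text.drop (i + 1) := List.drop_eq_getElem_cons hi
      have hne : decide (text.drop (i + 1) ≠ []) = decide (i + 1 < text.length) :=
        decide_eq_decide.mpr (by rw [ne_eq, List.drop_eq_nil_iff]; omega)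
      rw [pvFindLoopA, dif_pos hi, hdrop, pvMask, List.tail_drop, hne, pvHeadD_drop]
      dsimp only
      by_cases c1 : (text[i] == '\'' && !inD) = true
      · rw [if_pos c1, if_pos c1]
        by_cases e1 : (inS && decide (i + 1 < text.length) && (text.getD (i + 1) ' ' == '\'')) = true
        · rw [if_pos e1, if_pos e1, pvFirstOne, pvFirstOne]
          simp only [Bool.false_and, Bool.false_eq_true, if_false, ite_false, reduceIte]
          exact ih (i + 2) inS inD depth (by omega)
        · rw [if_neg e1, if_neg e1, pvFirstOne]
          simp only [Bool.false_and, Bool.false_eq_true, reduceIte]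
          exact ih (i + 1) (!inS) inD depth (by omega)
      · rw [if_neg c1, if_neg c1]
        by_cases c2 : (text[i] == '"' && !inS) = true
        · rw [if_pos c2, if_pos c2]
          by_cases e2 : (inD && decide (i + 1 < text.length) && (text.getD (i + 1) ' ' == '"')) = true
          · rw [if_pos e2, if_pos e2, pvFirstOne, pvFirstOne]
            simp only [Bool.false_and, Bool.false_eq_true, reduceIte]
            exact ih (i + 2) inS inD depth (by omega)
          · rw [if_neg e2, if_neg e2, pvFirstOne]
            simp only [Bool.false_and, Bool.false_eq_true, reduceIte]
            exact ih (i + 1) inS (!inD) depth (by omega)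
        · rw [if_neg c2, if_neg c2]
          by_cases c3 : (inS || inD) = true
          · rw [if_pos c3, if_pos c3, pvFirstOne]
            simp only [Bool.false_and, Bool.false_eq_true, reduceIte]
            exact ih (i + 1) inS inD depth (by omega)
          · rw [if_neg c3, if_neg c3]
            by_cases c4 : (text[i] == '(') = true
            · rw [if_pos c4, if_pos c4, pvFirstOne]
              simp only [Bool.false_and, Bool.false_eq_true, reduceIte]
              exact ih (i + 1) inS inD (depth + 1) (by omega)
            · rw [if_neg c4, if_neg c4]
              by_cases c5 : (text[i] == ')') = true
              · rw [if_pos c5, if_pos c5, pvFirstOne]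
                simp only [Bool.false_and, Bool.false_eq_true, reduceIte]
                exact ih (i + 1) inS inD (depth - 1) (by omega)
              · rw [if_neg c5, if_neg c5, pvFirstOne]
                have hwb : pvWordOkB tu text.length i ku = pvWordOkA tu ku text.length i := rfl
                rw [hwb]
                by_cases k : ((depth == 0) && pvWordOkA tu ku text.length i) = true
                · rw [if_pos k, if_pos k]
                  rfl
                · rw [if_neg k, if_neg k]
                  exact ih (i + 1) inS inD depth (by omega)
    · have hge : text.length ≤ i := by omega
      rw [pvFindLoopA, dif_neg (by omega), List.drop_eq_nil_iff.mpr hge, pvMask]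
      rfl

-- ===== VERDICT (by name: the statement is the Claim_ definition above) =====
theorem split_insert_prefix_py_spec : Claim_equal_split_insert_prefix_py := by
  unfold Claim_equal_split_insert_prefix_py
  intro s _
  unfold Spec_split_insert_prefix_py
  unfold split_insert_prefix_py split_insert_prefix_py_alt pvFindTopLevelKeyword
  dsimp only
  simp only [List.foldl_cons, List.foldl_nil]
  rw [show PySem.Chars.upper "VALUES".toList = "VALUES".toList from by decide,
      show PySem.Chars.upper "WITH".toList = "WITH".toList from by decide,
      show PySem.Chars.upper "SELECT".toList = "SELECT".toList from by decide]
  rw [pvFindLoopA_eq _ _ "VALUES".toList ((PySem.Str.strip s).toList.length) 0 false false 0 (by omega),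
      pvFindLoopA_eq _ _ "WITH".toList ((PySem.Str.strip s).toList.length) 0 false false 0 (by omega),
      pvFindLoopA_eq _ _ "SELECT".toList ((PySem.Str.strip s).toList.length) 0 false false 0 (by omega),
      List.drop_zero, pvFirstKw_eq]
  rcases ha : pvFirstOne (PySem.Chars.upper (PySem.Str.strip s).toList) "VALUES".toList
      (PySem.Str.strip s).toList.length (pvMask (PySem.Str.strip s).toList false false 0) 0 with _ | ja <;>
  rcases hb : pvFirstOne (PySem.Chars.upper (PySem.Str.strip s).toList) "WITH".toList
      (PySem.Str.strip s).toList.length (pvMask (PySem.Str.strip s).toList false false 0) 0 with _ | jb <;>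
  rcases hc : pvFirstOne (PySem.Chars.upper (PySem.Str.strip s).toList) "SELECT".toList
      (PySem.Str.strip s).toList.length (pvMask (PySem.Str.strip s).toList false false 0) 0 with _ | jc
  all_goals simp only [pvOptToInt, pvMinOpt, List.foldl_cons, List.foldl_nil]
  all_goals simp only [pvNeTrue, pvNeFalse, if_true, if_false, ite_true, ite_false,
    List.nil_append, List.cons_append, List.singleton_append, List.append_nil,
    List.isEmpty_cons, List.isEmpty_nil, Bool.false_eq_true, reduceIte,
    PySem.List.min?, List.foldl_cons, List.foldl_nil]
  case none.some.some =>
    split_ifs with h1 <;>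
      [rw [show ((min jb jc : Nat) : Int) = (jc : Int) from by omega];
       rw [show ((min jb jc : Nat) : Int) = (jb : Int) from by omega]]
  case some.none.some =>
    split_ifs with h1 <;>
      [rw [show ((min ja jc : Nat) : Int) = (jc : Int) from by omega];
       rw [show ((min ja jc : Nat) : Int) = (ja : Int) from by omega]]
  case some.some.none =>
    split_ifs with h1 <;>
      [rw [show ((min ja jb : Nat) : Int) = (jb : Int) from by omega];
       rw [show ((min ja jb : Nat) : Int) = (ja : Int) from by omega]]
  case some.some.some =>
    split_ifs with h1 h2 h3 <;>
    simp only [List.foldl_cons, List.foldl_nil] <;>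
    split_ifs with h4 <;>
    first
    | rw [show ((min ja (min jb jc) : Nat) : Int) = (ja : Int) from by omega]
    | rw [show ((min ja (min jb jc) : Nat) : Int) = (jb : Int) from by omega]
    | rw [show ((min ja (min jb jc) : Nat) : Int) = (jc : Int) from by omega]
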